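-- pv_equiv track=rewrite | github.com/CharlesAttend/K_Means-Classic_iris_KNN | K_Means.py | score_partition
-- ===== SOURCE A (Python) =====
-- def lol(p, pp, partition_initiale):
--     """
--     >>> lol(1, 2, [[1,3,6],[2,8,9]])
--     False
--
--     >>> lol(1,2,[[1,2,3,6], [8,5,9,7]])
--     True
--     """
--     for i in range(len(partition_initiale)):
--         for j in range(len(partition_initiale[i])):
--             if p in partition_initiale[i]:
--                 if pp in partition_initiale[i]:
--                     return True
--     else:
--         return False
--
-- def score_partition(partition_initiale, partition_kmeans):
--     """
--     >>> score_partition([[(5, 3), (5, 6), (5, 0), (4, 3), (0, 3), (2, 4), (5, 5), (6, 2), (2, 2), (4, 4)],[(9, 10), (10, 10), (11, 11), (11, 10), (8, 12), (13, 10), (10, 9), (8, 8), (12, 10), (9, 9)],[(10, 1), (9, 3), (8, 4), (7, 2), (11, 1), (9, 2), (12, 3), (10, 1), (9, 4), (10, 3)],[(4, 17), (5, 14), (4, 15), (5, 13), (4, 13), (7, 13), (6, 12), (6, 14), (4, 12), (4, 17)]],[[(5, 3), (5, 6), (5, 0), (4, 3), (0, 3), (2, 4), (5, 5), (6, 2),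 (2, 2), (4, 4)],[(9, 10), (10, 10), (11, 11), (11, 10), (8, 12), (13, 10), (10, 9), (8, 8), (12, 10), (9, 9)],[(10, 1), (9, 3), (8, 4), (7, 2), (11, 1), (9, 2), (12, 3), (10, 1), (9, 4), (10, 3)],[(4, 17), (5, 14), (4, 15), (5, 13), (4, 13), (7, 13), (6, 12), (6, 14), (4, 12), (4, 17)]])
--     6
--     """
--     list_a_test = list()
--     score = 0
--     for i in range(len(partition_kmeans)):
--         list_a_test = []
--         for a in range(len(partition_kmeans[i])):
--             list_a_test.append(a)
--
--         for j in range(len(partition_kmeans[i])):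
--             list_a_test.remove(j)
--             for k in list_a_test:
--                 if lol(partition_kmeans[i][j], partition_kmeans[i][k], partition_initiale):
--                     score+=1
--     return score
-- ===== SOURCE B (Python) =====
-- def score_partition(partition_initiale, partition_kmeans):
--     # For each point, the set of initial-cluster indices that contain it is
--     # computed once (dict built in one pass), so each pair test is a set
--     # intersection instead of a rescan of the whole initial partition.
--     memb = {}
--     for i, cluster in enumerate(partition_initiale):
--         for p in cluster:
--             memb.setdefault(tuple(p), set()).add(i)
--     empty = frozenset()
--     score = 0
--     for cluster in partition_kmeans:
--         ids = [memb.get(tuple(p), empty) for p in cluster]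
--         m = len(ids)
--         for j in range(m):
--             sj = ids[j]
--             for k in range(j + 1, m):
--                 if sj & ids[k]:
--                     score += 1
--     return score
-- ===== Notes on version B (the rewrite author's own statement) =====
-- stated objective: faster
-- what changed: B builds a dict from each point to the set of initial-cluster indices containing it in one pass, then tests each same-cluster pair by set intersection, instead of A's list_a_test.remove bookkeeping and per-pair rescan of the whole initial partition (helper lol).
import Mathlib
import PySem

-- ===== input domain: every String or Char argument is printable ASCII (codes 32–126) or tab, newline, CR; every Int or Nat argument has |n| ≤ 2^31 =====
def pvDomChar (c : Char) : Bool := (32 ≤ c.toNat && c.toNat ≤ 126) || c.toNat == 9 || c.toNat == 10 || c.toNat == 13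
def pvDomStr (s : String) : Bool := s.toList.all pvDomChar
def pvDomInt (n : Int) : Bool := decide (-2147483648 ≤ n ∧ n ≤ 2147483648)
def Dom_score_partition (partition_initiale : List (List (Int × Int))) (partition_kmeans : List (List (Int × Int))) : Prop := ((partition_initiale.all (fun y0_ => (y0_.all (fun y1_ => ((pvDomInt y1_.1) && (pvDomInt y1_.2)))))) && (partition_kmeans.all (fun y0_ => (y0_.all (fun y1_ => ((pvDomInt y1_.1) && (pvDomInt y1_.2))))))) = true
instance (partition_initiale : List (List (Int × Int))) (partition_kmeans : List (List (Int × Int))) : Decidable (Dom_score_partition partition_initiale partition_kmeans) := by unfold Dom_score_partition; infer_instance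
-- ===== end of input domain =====

-- B replaces A's per-pair rescan of the whole initial partition by a dict from point to the
-- set of initial-cluster indices, built once; pairs are then tested by set intersection.

-- ===== PORT A =====

-- helper 'lol' of A: returns True iff some initial cluster contains both p and pp
-- (the inner 'for j in range(len(partition_initiale[i]))' re-tests the same condition;
--  it is kept as a loop over that range, faithful to the early return).
def lol (p pp : Int × Int) (partition_initiale : List (List (Int × Int))) : Bool :=
  (PySem.List.pyRange 0 partition_initiale.length 1).any (fun i =>
    let c := PySem.List.pyGetD partition_initiale i []   -- index from range: always in range, Python never raises
    (PySem.List.pyRange 0 c.length 1).any (fun _ => c.contains p && c.contains pp))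

def score_partition (partition_initiale : List (List (Int × Int))) (partition_kmeans : List (List (Int × Int))) : Int :=
  -- for i in range(len(partition_kmeans)): …
  (PySem.List.pyRange 0 partition_kmeans.length 1).foldl (fun score i =>
    let cluster := PySem.List.pyGetD partition_kmeans i []   -- index from range: in range
    -- list_a_test = []; for a in range(len(…)): list_a_test.append(a)
    let lat0 : List Int := (PySem.List.pyRange 0 cluster.length 1).foldl (fun l a => l ++ [a]) []
    -- for j in range(…): list_a_test.remove(j); for k in list_a_test: …
    ((PySem.List.pyRange 0 cluster.length 1).foldl (fun (st : List Int × Int) j =>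
      let lat := (PySem.List.remove? st.1 j).getD st.1      -- j is always present; Python's .remove never raises here
      (lat, lat.foldl (fun sc k =>
        if lol (PySem.List.pyGetD cluster j (0, 0)) (PySem.List.pyGetD cluster k (0, 0)) partition_initiale
        then sc + 1 else sc) st.2)) (lat0, score)).2) 0

-- ===== PORT B =====

-- memb = {}; for i, cluster in enumerate(partition_initiale): for p in cluster: memb.setdefault(p, set()).add(i)
def pvMemb (partition_initiale : List (List (Int × Int))) : PySem.Dict (Int × Int) (PySem.Set Int) :=
  (PySem.List.enumerate partition_initiale 0).foldl (fun d ic =>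
    ic.2.foldl (fun d p => PySem.Dict.modify d p [] (fun s => PySem.Set.add s ic.1)) d) PySem.Dict.empty

def score_partition_alt (partition_initiale : List (List (Int × Int))) (partition_kmeans : List (List (Int × Int))) : Int :=
  let memb := pvMemb partition_initiale
  partition_kmeans.foldl (fun score cluster =>
    -- ids = [memb.get(p, empty) for p in cluster]
    let ids := cluster.map (fun p => PySem.Dict.getD memb p [])
    let m := ids.length
    (PySem.List.pyRange 0 m 1).foldl (fun sc j =>
      let sj := PySem.List.pyGetD ids j []                  -- j from range: in range
      (PySem.List.pyRange (j + 1) m 1).foldl (fun sc k =>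
        if PySem.Set.inter sj (PySem.List.pyGetD ids k []) ≠ [] then sc + 1 else sc) sc) score) 0

-- ===== PRECONDITION & SPEC =====
def Spec_score_partition (partition_initiale : List (List (Int × Int))) (partition_kmeans : List (List (Int × Int))) (out : Int) : Prop := out = score_partition_alt partition_initiale partition_kmeans
instance (partition_initiale : List (List (Int × Int))) (partition_kmeans : List (List (Int × Int))) (out : Int) : Decidable (Spec_score_partition partition_initiale partition_kmeans out) := by unfold Spec_score_partition; infer_instance

-- ===== CLAIM (what is proved, stated in full; the proofs are below) =====
def Claim_equal_score_partition : Prop := ∀ (partition_initiale : List (List (Int × Int))) (partition_kmeans : List (List (Int × Int))), Dom_score_partition partition_initiale partition_kmeans → Spec_score_partition partition_initiale partition_kmeans (score_partition partition_initiale partition_kmeans)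

-- ===== LEMMAS AND PROOFS =====

theorem lol_iff (p pp : Int × Int) (PI : List (List (Int × Int))) :
    lol p pp PI = true ↔ ∃ c ∈ PI, p ∈ c ∧ pp ∈ c := by
  unfold lol
  simp only [List.any_eq_true, PySem.List.mem_pyRange_one]
  constructor
  · rintro ⟨i, ⟨h0, hm⟩, hin⟩
    have hlt : i.toNat < PI.length := by omega
    rw [PySem.List.pyGetD_eq_getElem _ _ h0 (by exact_mod_cast hm)] at hin
    obtain ⟨j, hj, hb⟩ := hin
    simp only [Bool.and_eq_true, List.contains_iff_mem] at hb
    exact ⟨PI[i.toNat], List.getElem_mem _, hb.1, hb.2⟩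
  · rintro ⟨c, hc, hp, hpp⟩
    obtain ⟨k, hk, rfl⟩ := List.getElem_of_mem hc
    refine ⟨(k : Int), ⟨by positivity, by exact_mod_cast hk⟩, ?_⟩
    rw [PySem.List.pyGetD_natCast]
    have : PI.getD k [] = PI[k] := List.getD_eq_getElem _ _ hk
    rw [this]
    refine ⟨(0 : Int), ?_, ?_⟩
    · constructor
      · exact le_refl 0
      · have : PI[k] ≠ [] := by intro h; rw [h] at hp; exact absurd hp (List.not_mem_nil)
        have : 0 < PI[k].length := List.length_pos_of_ne_nil this
        exact_mod_cast this
    · simp [hp, hpp]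

theorem getD_inner (c : List (Int × Int)) (d : PySem.Dict (Int × Int) (PySem.Set Int))
    (i : Int) (p : Int × Int) :
    (c.foldl (fun d q => PySem.Dict.modify d q [] (fun s => PySem.Set.add s i)) d).getD p []
      = if p ∈ c then (d.getD p []).add i else d.getD p [] := by
  induction c generalizing d with
  | nil => simp
  | cons q t ih =>
    simp only [List.foldl_cons, ih, List.mem_cons]
    by_cases hqp : p = q
    · subst hqp
      rw [PySem.Dict.getD_modify_self]
      by_cases hpt : p ∈ t <;> simp [hpt]
      
    · rw [PySem.Dict.getD_modify_of_ne _ _ _ hqp]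
      simp [hqp]

theorem mem_getD_fold (l : List (Int × List (Int × Int))) (d : PySem.Dict (Int × Int) (PySem.Set Int))
    (p : Int × Int) (x : Int) :
    (x ∈ (l.foldl (fun d ic => ic.2.foldl (fun d q => PySem.Dict.modify d q [] (fun s => PySem.Set.add s ic.1)) d) d).getD p [])
      ↔ x ∈ d.getD p [] ∨ ∃ ic ∈ l, p ∈ ic.2 ∧ x = ic.1 := by
  induction l generalizing d with
  | nil => simp
  | cons ic t ih =>
    simp only [List.foldl_cons, ih, getD_inner, List.mem_cons]
    by_cases hp : p ∈ ic.2
    · simp only [hp, if_pos, PySem.Set.mem_add]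
      constructor
      · rintro (⟨h | h⟩ | h)
        · exact Or.inl h
        · exact Or.inr ⟨ic, Or.inl rfl, hp, h⟩
        · obtain ⟨jc, hjc, h1, h2⟩ := h
          exact Or.inr ⟨jc, Or.inr hjc, h1, h2⟩
      · rintro (h | ⟨jc, hjc | hjc, h1, h2⟩)
        · exact Or.inl (Or.inl h)
        · exact Or.inl (Or.inr (hjc ▸ h2))
        · exact Or.inr ⟨jc, hjc, h1, h2⟩
    · simp only [hp, if_neg, not_false_iff]
      constructor
      · rintro (h | h)
        · exact Or.inl h
        · obtain ⟨jc, hjc, h1, h2⟩ := h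
          exact Or.inr ⟨jc, Or.inr hjc, h1, h2⟩
      · rintro (h | ⟨jc, hjc | hjc, h1, h2⟩)
        · exact Or.inl h
        · exact absurd (hjc ▸ h1) hp
        · exact Or.inr ⟨jc, hjc, h1, h2⟩

theorem mem_pvMemb (PI : List (List (Int × Int))) (p : Int × Int) (x : Int) :
    x ∈ (pvMemb PI).getD p [] ↔ ∃ k : Nat, ∃ _ : k < PI.length, p ∈ PI[k] ∧ x = (k : Int) := by
  unfold pvMemb
  rw [mem_getD_fold]
  simp only [PySem.List.mem_enumerate_iff]
  constructor
  · rintro (h | ⟨ic, ⟨k, hk, hic⟩, hp, hx⟩)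
    · simp [PySem.Dict.getD, PySem.Dict.get?, PySem.Dict.empty] at h
    · subst hic
      exact ⟨k, hk, hp, by simpa using hx⟩
  · rintro ⟨k, hk, hp, rfl⟩
    exact Or.inr ⟨((k : Int), PI[k]), ⟨k, hk, by simp⟩, hp, rfl⟩

theorem inter_ne_nil_iff (s t : PySem.Set Int) :
    PySem.Set.inter s t ≠ [] ↔ ∃ x, x ∈ s ∧ x ∈ t := by
  constructor
  · intro h
    match hs : PySem.Set.inter s t with
    | [] => exact absurd hs h
    | x :: r =>
      have : x ∈ PySem.Set.inter s t := by rw [hs]; exact List.mem_cons_self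
      rw [PySem.Set.mem_inter] at this
      exact ⟨x, this⟩
  · rintro ⟨x, h1, h2⟩ hnil
    have : x ∈ PySem.Set.inter s t := (PySem.Set.mem_inter s t x).mpr ⟨h1, h2⟩
    rw [hnil] at this
    exact absurd this List.not_mem_nil

theorem cond_iff (PI : List (List (Int × Int))) (p pp : Int × Int) :
    (PySem.Set.inter ((pvMemb PI).getD p []) ((pvMemb PI).getD pp []) ≠ []) ↔ ∃ c ∈ PI, p ∈ c ∧ pp ∈ c := by
  rw [inter_ne_nil_iff]
  constructor
  · rintro ⟨x, h1, h2⟩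
    rw [mem_pvMemb] at h1 h2
    obtain ⟨k, hk, hp, rfl⟩ := h1
    obtain ⟨k', hk', hpp, he⟩ := h2
    obtain rfl : k' = k := by exact_mod_cast he.symm
    exact ⟨PI[k'], List.getElem_mem _, hp, hpp⟩
  · rintro ⟨c, hc, hp, hpp⟩
    obtain ⟨k, hk, rfl⟩ := List.getElem_of_mem hc
    exact ⟨(k : Int), (mem_pvMemb _ _ _).mpr ⟨k, hk, hp, rfl⟩, (mem_pvMemb _ _ _).mpr ⟨k, hk, hpp, rfl⟩⟩

theorem lol_eq_decide (PI : List (List (Int × Int))) (p pp : Int × Int) :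
    lol p pp PI = decide (PySem.Set.inter ((pvMemb PI).getD p []) ((pvMemb PI).getD pp []) ≠ []) := by
  rw [Bool.eq_iff_iff]
  simp only [lol_iff, decide_eq_true_eq, cond_iff]

theorem invA (PI : List (List (Int × Int))) (cluster : List (Int × Int)) :
    ∀ (n : Nat) (a s : Int), ((cluster.length : Int) - a).toNat = n →
    ((PySem.List.pyRange a (cluster.length : Int)).foldl (fun (st : List Int × Int) j =>
      let lat := (PySem.List.remove? st.1 j).getD st.1
      (lat, lat.foldl (fun sc k =>
        if lol (PySem.List.pyGetD cluster j (0, 0)) (PySem.List.pyGetD cluster k (0, 0)) PI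
        then sc + 1 else sc) st.2)) (PySem.List.pyRange a (cluster.length : Int), s)).2
    = s + ((PySem.List.pyRange a (cluster.length : Int)).map (fun j =>
        (((PySem.List.pyRange (j + 1) (cluster.length : Int)).countP (fun k =>
          lol (PySem.List.pyGetD cluster j (0, 0)) (PySem.List.pyGetD cluster k (0, 0)) PI)) : Int))).sum := by
  intro n
  induction n with
  | zero =>
    intro a s h
    rw [PySem.List.pyRange_one_eq_nil (by omega)]
    simp
  | succ n ih =>
    intro a s h
    have ha : a < (cluster.length : Int) := by omega
    rw [PySem.List.pyRange_one_cons ha]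
    simp only [List.foldl_cons, List.map_cons, List.sum_cons]
    rw [PySem.List.remove?_cons_self]
    simp only [Option.getD_some]
    rw [PySem.List.foldl_if_add_one]
    rw [ih (a + 1) _ (by omega)]
    ring

theorem perClusterA (PI : List (List (Int × Int))) (cluster : List (Int × Int)) (score : Int) :
    ((PySem.List.pyRange 0 (cluster.length : Int)).foldl (fun (st : List Int × Int) j =>
      let lat := (PySem.List.remove? st.1 j).getD st.1
      (lat, lat.foldl (fun sc k =>
        if lol (PySem.List.pyGetD cluster j (0, 0)) (PySem.List.pyGetD cluster k (0, 0)) PI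
        then sc + 1 else sc) st.2))
      ((PySem.List.pyRange 0 (cluster.length : Int)).foldl (fun l a => l ++ [a]) [], score)).2
    = score + ((PySem.List.pyRange 0 (cluster.length : Int)).map (fun j =>
        (((PySem.List.pyRange (j + 1) (cluster.length : Int)).countP (fun k =>
          lol (PySem.List.pyGetD cluster j (0, 0)) (PySem.List.pyGetD cluster k (0, 0)) PI)) : Int))).sum := by
  rw [PySem.List.foldl_append_singleton_eq_self, List.nil_append]
  exact invA PI cluster _ 0 score rfl

theorem perClusterB (ids : List (PySem.Set Int)) (score : Int) :
    (PySem.List.pyRange 0 (ids.length : Int)).foldl (fun sc j =>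
      (PySem.List.pyRange (j + 1) (ids.length : Int)).foldl (fun sc k =>
        if PySem.Set.inter (PySem.List.pyGetD ids j []) (PySem.List.pyGetD ids k []) ≠ [] then sc + 1 else sc) sc) score
    = score + ((PySem.List.pyRange 0 (ids.length : Int)).map (fun j =>
        (((PySem.List.pyRange (j + 1) (ids.length : Int)).countP (fun k =>
          decide (PySem.Set.inter (PySem.List.pyGetD ids j []) (PySem.List.pyGetD ids k []) ≠ []))) : Int))).sum := by
  simp only [PySem.List.foldl_ite_add_one]
  rw [PySem.List.foldl_add]

theorem sum_eq (PI : List (List (Int × Int))) (cluster : List (Int × Int)) :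
    ((PySem.List.pyRange 0 (cluster.length : Int)).map (fun j =>
        (((PySem.List.pyRange (j + 1) (cluster.length : Int)).countP (fun k =>
          lol (PySem.List.pyGetD cluster j (0, 0)) (PySem.List.pyGetD cluster k (0, 0)) PI)) : Int))).sum
    = ((PySem.List.pyRange 0 ((cluster.map (fun p => (pvMemb PI).getD p [])).length : Int)).map (fun j =>
        (((PySem.List.pyRange (j + 1) ((cluster.map (fun p => (pvMemb PI).getD p [])).length : Int)).countP (fun k =>
          decide (PySem.Set.inter (PySem.List.pyGetD (cluster.map (fun p => (pvMemb PI).getD p [])) j [])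
                                  (PySem.List.pyGetD (cluster.map (fun p => (pvMemb PI).getD p [])) k []) ≠ []))) : Int))).sum := by
  have hlen : (cluster.map (fun p => (pvMemb PI).getD p [])).length = cluster.length := by simp
  rw [hlen]
  congr 1
  apply List.map_congr_left
  intro j hj
  rw [PySem.List.mem_pyRange_one] at hj
  congr 1
  apply List.countP_congr
  intro k hk
  rw [PySem.List.mem_pyRange_one] at hk
  have hj' : j.toNat < cluster.length := by omega
  have hk' : k.toNat < cluster.length := by omega
  rw [PySem.List.pyGetD_eq_getElem cluster (0,0) (by omega) (by omega),
      PySem.List.pyGetD_eq_getElem cluster (0,0) (by omega) (by omega),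
      PySem.List.pyGetD_eq_getElem _ [] (by omega) (by rw [hlen]; omega),
      PySem.List.pyGetD_eq_getElem _ [] (by omega) (by rw [hlen]; omega)]
  simp only [List.getElem_map]
  rw [lol_eq_decide PI]

theorem main_eq (PI PK : List (List (Int × Int))) : score_partition PI PK = score_partition_alt PI PK := by
  unfold score_partition score_partition_alt
  refine Eq.trans (PySem.List.foldl_pyRange_zero_pyGetD' PK ([] : List (Int × Int))
    (fun (score : Int) (cluster : List (Int × Int)) =>
      ((PySem.List.pyRange 0 (cluster.length : Int)).foldl (fun (st : List Int × Int) j =>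
        ((PySem.List.remove? st.1 j).getD st.1,
          ((PySem.List.remove? st.1 j).getD st.1).foldl (fun sc k =>
            if lol (PySem.List.pyGetD cluster j (0, 0)) (PySem.List.pyGetD cluster k (0, 0)) PI
            then sc + 1 else sc) st.2))
        ((PySem.List.pyRange 0 (cluster.length : Int)).foldl (fun l a => l ++ [a]) [], score)).2) 0) ?_
  apply PySem.List.foldl_congr_mem
  intro score cluster _
  simp only
  rw [perClusterA, perClusterB, sum_eq]

-- ===== VERDICT (by name: the statement is the Claim_ definition above) =====
theorem score_partition_spec : Claim_equal_score_partition := by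
  intro partition_initiale partition_kmeans _
  exact main_eq partition_initiale partition_kmeans
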